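-- pv_equiv track=rewrite | github.com/ShaquallLee/PythonAutoTest | myAlgorithms/DP/number_get.py | numberGet2
-- ===== SOURCE A (Python) =====
-- def numberGet2(arr):
--     '''
--     使用动态规划来解决这个问题'''
--     l = len(arr)
--     f = [[-1]*l for i in range(l)]  # f表示先手拿到的最好结果，
--     # 如第i行第j列的值表示从第i个数开始到第j个数，作为先手能够拿到的最高的分
--
--     s = [[-1]*l for i in range(l)]  # s表示后手拿到的最后的结果，
--     # 如第i行第j列的值表示的是从第i个数开始到第j个数，作为后手能够拿到的最高分
--
--     for i in range(l):
--         f[i][i] = arr[i]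
--         s[i][i] = 0
--
--     for j in range(1, l):
--         x = 0
--         y = j
--         while y < l:
--             f[x][y] = max(
--                 arr[x]+s[x+1][y],
--                 arr[y]+s[x][y-1]
--             )
--             s[x][y] = min(
--                 f[x+1][y],
--                 f[x][y-1]
--             )
--             x += 1
--             y += 1
--     return "先手赢" if f[0][l-1]>s[0][l-1] else "后手赢" #这样求到的是谁能赢
-- ===== SOURCE B (Python) =====
-- def numberGet2(arr):
--     """Single rolling 1-D table of the mover's net advantage over arr[i..i+length]."""
--     l = len(arr)
--     dp = list(arr)  # length-1 intervals: net advantage is the number itself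
--     for length in range(1, l):
--         for i in range(l - length):
--             dp[i] = max(arr[i] - dp[i + 1], arr[i + length] - dp[i])
--     return "先手赢" if dp[0] > 0 else "后手赢"
-- ===== Notes on version B (the rewrite author's own statement) =====
-- stated objective: simpler
-- what changed: Replaces the two l*l first/second-player score tables filled along diagonals by a single rolling 1-D array of the mover's net advantage (best-first minus best-second) per interval, updated in place for each interval length; the winner is read off the sign of the whole-array net advantage.
import Mathlib
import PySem

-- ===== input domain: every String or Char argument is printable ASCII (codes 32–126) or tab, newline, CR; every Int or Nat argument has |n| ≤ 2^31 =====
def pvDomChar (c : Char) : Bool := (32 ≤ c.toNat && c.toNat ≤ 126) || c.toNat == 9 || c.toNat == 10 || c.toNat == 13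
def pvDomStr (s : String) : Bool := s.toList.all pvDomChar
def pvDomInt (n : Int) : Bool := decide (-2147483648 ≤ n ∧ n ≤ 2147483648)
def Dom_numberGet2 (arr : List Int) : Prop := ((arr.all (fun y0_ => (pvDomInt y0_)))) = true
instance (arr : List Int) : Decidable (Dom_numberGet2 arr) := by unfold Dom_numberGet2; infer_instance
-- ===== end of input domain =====

-- B replaces A's two l×l first/second-player score tables by one rolling 1-D net-advantage
-- array (objective: simpler, O(n) space); both raise IndexError on [] (excluded by Pre_).

-- ===== PORT A =====
-- the 2-D tables f, s are kept as functions Nat → Nat → Int; pvUpd is the write t[i][j] = v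
-- (all reads A performs are in range on Pre_, so arr.getD i 0 = arr[i] exactly)
def pvUpd (t : Nat → Nat → Int) (i j : Nat) (v : Int) : Nat → Nat → Int :=
  fun a b => if a = i ∧ b = j then v else t a b

-- 'for i in range(l): f[i][i] = arr[i]; s[i][i] = 0'
def initLoop (arr : List Int) (l i : Nat) (f s : Nat → Nat → Int) :
    (Nat → Nat → Int) × (Nat → Nat → Int) :=
  if _h : i < l then
    initLoop arr l (i + 1) (pvUpd f i i (arr.getD i 0)) (pvUpd s i i 0)
  else (f, s)
termination_by l - i

-- the inner 'while y < l' loop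
def diagStep (arr : List Int) (l x y : Nat) (f s : Nat → Nat → Int) :
    (Nat → Nat → Int) × (Nat → Nat → Int) :=
  if _h : y < l then
    diagStep arr l (x + 1) (y + 1)
      (pvUpd f x y (max (arr.getD x 0 + s (x + 1) y) (arr.getD y 0 + s x (y - 1))))
      (pvUpd s x y (min (f (x + 1) y) (f x (y - 1))))
  else (f, s)
termination_by l - y

-- 'for j in range(1, l): x = 0; y = j; while …'
def diagLoop (arr : List Int) (l j : Nat)
    (fs : (Nat → Nat → Int) × (Nat → Nat → Int)) :
    (Nat → Nat → Int) × (Nat → Nat → Int) :=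
  if _h : j < l then
    diagLoop arr l (j + 1) (diagStep arr l 0 j fs.1 fs.2)
  else fs
termination_by l - j

def numberGet2 (arr : List Int) : String :=
  let l := arr.length
  let fs0 := initLoop arr l 0 (fun _ _ => -1) (fun _ _ => -1)
  let fs := diagLoop arr l 1 fs0
  if fs.1 0 (l - 1) > fs.2 0 (l - 1) then "先手赢" else "后手赢"

-- ===== PORT B =====
-- 'for i in range(l - length): dp[i] = max(arr[i] - dp[i+1], arr[i+length] - dp[i])'
def rowLoop (arr : List Int) (l L : Nat) (dp : List Int) : List Int :=
  (List.range (l - L)).foldl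
    (fun dp i =>
      dp.set i (max (arr.getD i 0 - dp.getD (i + 1) 0) (arr.getD (i + L) 0 - dp.getD i 0)))
    dp

-- 'for length in range(1, l): …'
def lenLoop (arr : List Int) (l L : Nat) (dp : List Int) : List Int :=
  if _h : L < l then lenLoop arr l (L + 1) (rowLoop arr l L dp)
  else dp
termination_by l - L

def numberGet2_alt (arr : List Int) : String :=
  let l := arr.length
  let dp := lenLoop arr l 1 arr
  if dp.getD 0 0 > 0 then "先手赢" else "后手赢"

-- ===== PRECONDITION & SPEC =====
-- Pre_ excludes only the empty list, on which A (and B) raise IndexError.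
def Pre_numberGet2 (arr : List Int) : Prop := arr ≠ []
instance (arr : List Int) : Decidable (Pre_numberGet2 arr) := by
  unfold Pre_numberGet2; infer_instance

def pvWitness_numberGet2 : List Int := [1, 2, 100, 4]

def Spec_numberGet2 (arr : List Int) (out : String) : Prop := out = numberGet2_alt arr
instance (arr : List Int) (out : String) : Decidable (Spec_numberGet2 arr out) := by
  unfold Spec_numberGet2; infer_instance

-- ===== CLAIM (what is proved, stated in full; the proofs are below) =====
def Claim_equal_numberGet2 : Prop :=
  ∀ (arr : List Int), Dom_numberGet2 arr → Pre_numberGet2 arr →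
    Spec_numberGet2 arr (numberGet2 arr)

-- ===== LEMMAS AND PROOFS =====

-- the mathematical DP values over the interval arr[x..y]
mutual
def Ffun (arr : List Int) (x y : Nat) : Int :=
  if _h : x < y then
    max (arr.getD x 0 + Sfun arr (x + 1) y) (arr.getD y 0 + Sfun arr x (y - 1))
  else arr.getD x 0
termination_by y - x
decreasing_by all_goals omega
def Sfun (arr : List Int) (x y : Nat) : Int :=
  if _h : x < y then min (Ffun arr (x + 1) y) (Ffun arr x (y - 1)) else 0
termination_by y - x
decreasing_by all_goals omega
end

def Gfun (arr : List Int) (x y : Nat) : Int :=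
  if _h : x < y then
    max (arr.getD x 0 - Gfun arr (x + 1) y) (arr.getD y 0 - Gfun arr x (y - 1))
  else arr.getD x 0
termination_by y - x
decreasing_by all_goals omega

-- interval sum, used to relate (F, S) to G
def Tsum (arr : List Int) (x y : Nat) : Int :=
  if _h : x < y then arr.getD x 0 + Tsum arr (x + 1) y else arr.getD x 0
termination_by y - x
decreasing_by omega

theorem Ffun_lt (arr : List Int) (x y : Nat) (h : x < y) :
    Ffun arr x y = max (arr.getD x 0 + Sfun arr (x + 1) y)
      (arr.getD y 0 + Sfun arr x (y - 1)) := by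
  rw [Ffun, dif_pos h]

theorem Ffun_ge (arr : List Int) (x y : Nat) (h : ¬ x < y) :
    Ffun arr x y = arr.getD x 0 := by
  rw [Ffun, dif_neg h]

theorem Sfun_lt (arr : List Int) (x y : Nat) (h : x < y) :
    Sfun arr x y = min (Ffun arr (x + 1) y) (Ffun arr x (y - 1)) := by
  rw [Sfun, dif_pos h]

theorem Sfun_ge (arr : List Int) (x y : Nat) (h : ¬ x < y) : Sfun arr x y = 0 := by
  rw [Sfun, dif_neg h]

theorem Gfun_lt (arr : List Int) (x y : Nat) (h : x < y) :
    Gfun arr x y = max (arr.getD x 0 - Gfun arr (x + 1) y)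
      (arr.getD y 0 - Gfun arr x (y - 1)) := by
  rw [Gfun, dif_pos h]

theorem Gfun_ge (arr : List Int) (x y : Nat) (h : ¬ x < y) :
    Gfun arr x y = arr.getD x 0 := by
  rw [Gfun, dif_neg h]

theorem Tsum_lt (arr : List Int) (x y : Nat) (h : x < y) :
    Tsum arr x y = arr.getD x 0 + Tsum arr (x + 1) y := by
  rw [Tsum, dif_pos h]

theorem Tsum_ge (arr : List Int) (x y : Nat) (h : ¬ x < y) :
    Tsum arr x y = arr.getD x 0 := by
  rw [Tsum, dif_neg h]

theorem Tsum_right (arr : List Int) :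
    ∀ d x y, y - x ≤ d → x < y → Tsum arr x y = arr.getD y 0 + Tsum arr x (y - 1) := by
  intro d
  induction d with
  | zero => intro x y h1 h2; omega
  | succ d ih =>
    intro x y h1 h2
    rw [Tsum_lt arr x y h2]
    by_cases h3 : x + 1 < y
    · rw [ih (x + 1) y (by omega) h3, Tsum_lt arr x (y - 1) (by omega)]
      have : y - 1 - 1 + 1 = y - 1 := by omega
      ring
    · have hy : y = x + 1 := by omega
      subst hy
      rw [Tsum_ge arr (x + 1) (x + 1) (by omega),
        show x + 1 - 1 = x from by omega, Tsum_ge arr x x (by omega)]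
      ring

theorem FS_G (arr : List Int) :
    ∀ d x y, y - x ≤ d →
      Ffun arr x y + Sfun arr x y = Tsum arr x y ∧
      Ffun arr x y - Sfun arr x y = Gfun arr x y := by
  intro d
  induction d with
  | zero =>
    intro x y h1
    have hxy : ¬ x < y := by omega
    rw [Ffun_ge arr x y hxy, Sfun_ge arr x y hxy, Gfun_ge arr x y hxy,
      Tsum_ge arr x y hxy]
    omega
  | succ d ih =>
    intro x y h1
    by_cases hxy : x < y
    · obtain ⟨h1a, h1b⟩ := ih (x + 1) y (by omega)
      obtain ⟨h2a, h2b⟩ := ih x (y - 1) (by omega)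
      have ht1 := Tsum_lt arr x y hxy
      have ht2 := Tsum_right arr (y - x) x y le_rfl hxy
      rw [Ffun_lt arr x y hxy, Sfun_lt arr x y hxy, Gfun_lt arr x y hxy]
      simp only [max_def, min_def]
      split_ifs <;> constructor <;> omega
    · rw [Ffun_ge arr x y hxy, Sfun_ge arr x y hxy, Gfun_ge arr x y hxy,
        Tsum_ge arr x y hxy]
      omega

theorem diagStep_inv (arr : List Int) (l j : Nat) (hj : 1 ≤ j) :
    ∀ d y x f s, l ≤ y + d → y = x + j →
      (∀ a b, a ≤ b → b < l → (b - a < j ∨ (b - a = j ∧ b < y)) →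
        f a b = Ffun arr a b ∧ s a b = Sfun arr a b) →
      ∀ a b, a ≤ b → b < l → b - a ≤ j →
        (diagStep arr l x y f s).1 a b = Ffun arr a b ∧
        (diagStep arr l x y f s).2 a b = Sfun arr a b := by
  intro d
  induction d with
  | zero =>
    intro y x f s hd hxy H a b hab hbl hba
    rw [diagStep, dif_neg (show ¬ y < l by omega)]
    exact H a b hab hbl (by omega)
  | succ d ih =>
    intro y x f s hd hxy H a b hab hbl hba
    by_cases hyl : y < l
    · rw [diagStep, dif_pos hyl]
      refine ih (y + 1) (x + 1) _ _ (by omega) (by omega) ?_ a b hab hbl hba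
      intro a b hab hbl hcond
      by_cases hxyab : a = x ∧ b = y
      · obtain ⟨rfl, rfl⟩ := hxyab
        have e1 := (H (a + 1) b (by omega) hbl (by omega)).2
        have e2 := (H a (b - 1) (by omega) (by omega) (by omega)).2
        have e3 := (H (a + 1) b (by omega) hbl (by omega)).1
        have e4 := (H a (b - 1) (by omega) (by omega) (by omega)).1
        constructor
        · show pvUpd f a b _ a b = _
          simp only [pvUpd, and_self, if_true]
          rw [e1, e2, Ffun_lt arr a b (by omega)]
        · show pvUpd s a b _ a b = _
          simp only [pvUpd, and_self, if_true]
          rw [e3, e4, Sfun_lt arr a b (by omega)]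
      · have hby : b - a < j ∨ (b - a = j ∧ b < y) := by
          rcases hcond with h | ⟨h1, h2⟩
          · exact Or.inl h
          · refine Or.inr ⟨h1, ?_⟩
            rcases Nat.lt_or_ge b y with h3 | h3
            · exact h3
            · exact absurd ⟨by omega, by omega⟩ hxyab
        have := H a b hab hbl hby
        constructor
        · show pvUpd f x y _ a b = _
          simp only [pvUpd, if_neg hxyab]
          exact this.1
        · show pvUpd s x y _ a b = _
          simp only [pvUpd, if_neg hxyab]
          exact this.2
    · rw [diagStep, dif_neg hyl]
      exact H a b hab hbl (by omega)

theorem diagLoop_inv (arr : List Int) (l : Nat) :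
    ∀ d j fs, l ≤ j + d → 1 ≤ j →
      (∀ a b, a ≤ b → b < l → b - a < j →
        fs.1 a b = Ffun arr a b ∧ fs.2 a b = Sfun arr a b) →
      ∀ a b, a ≤ b → b < l →
        (diagLoop arr l j fs).1 a b = Ffun arr a b ∧
        (diagLoop arr l j fs).2 a b = Sfun arr a b := by
  intro d
  induction d with
  | zero =>
    intro j fs hd hj H a b hab hbl
    rw [diagLoop, dif_neg (show ¬ j < l by omega)]
    exact H a b hab hbl (by omega)
  | succ d ih =>
    intro j fs hd hj H a b hab hbl
    by_cases hjl : j < l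
    · rw [diagLoop, dif_pos hjl]
      refine ih (j + 1) _ (by omega) (by omega) ?_ a b hab hbl
      intro a b hab hbl hba
      exact diagStep_inv arr l j hj l j 0 fs.1 fs.2 (by omega) (by omega)
        (fun a b hab hbl hc => H a b hab hbl (by omega)) a b hab hbl (by omega)
    · rw [diagLoop, dif_neg hjl]
      exact H a b hab hbl (by omega)

theorem initLoop_inv (arr : List Int) (l : Nat) :
    ∀ d i f s, l ≤ i + d → ∀ a b,
      ((initLoop arr l i f s).1 a b =
        if a = b ∧ i ≤ a ∧ a < l then arr.getD a 0 else f a b) ∧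
      ((initLoop arr l i f s).2 a b =
        if a = b ∧ i ≤ a ∧ a < l then 0 else s a b) := by
  intro d
  induction d with
  | zero =>
    intro i f s hd a b
    rw [initLoop, dif_neg (show ¬ i < l by omega), if_neg (by omega), if_neg (by omega)]
    exact ⟨rfl, rfl⟩
  | succ d ih =>
    intro i f s hd a b
    by_cases hil : i < l
    · rw [initLoop, dif_pos hil]
      obtain ⟨ha, hb⟩ := ih (i + 1) (pvUpd f i i (arr.getD i 0)) (pvUpd s i i 0)
        (by omega) a b
      rw [ha, hb]
      simp only [pvUpd]
      constructor <;> split_ifs <;> simp_all <;> omega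
    · rw [initLoop, dif_neg hil, if_neg (by omega), if_neg (by omega)]
      exact ⟨rfl, rfl⟩

theorem pvGetDSet (xs : List Int) (k : Nat) (v : Int) (i : Nat) (hk : k < xs.length) :
    (xs.set k v).getD i 0 = if i = k then v else xs.getD i 0 := by
  simp only [List.getD_eq_getElem?_getD, List.getElem?_set]
  split_ifs with h1 h2 h2
  · subst h1; simp
  · omega
  · omega
  · rfl

theorem rowFold_inv (arr : List Int) (l L : Nat) (hL : 1 ≤ L) (hLl : L < l) :
    ∀ k dp, k ≤ l - L → dp.length = l →
      (∀ i, i < l → dp.getD i 0 = Gfun arr i (min (i + (L - 1)) (l - 1))) →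
      ((List.range k).foldl
          (fun (dp : List Int) i => dp.set i (max (arr.getD i 0 - dp.getD (i + 1) 0)
            (arr.getD (i + L) 0 - dp.getD i 0))) dp).length = l ∧
      ∀ i, i < l →
        ((List.range k).foldl
          (fun (dp : List Int) i => dp.set i (max (arr.getD i 0 - dp.getD (i + 1) 0)
            (arr.getD (i + L) 0 - dp.getD i 0))) dp).getD i 0 =
        if i < k then Gfun arr i (min (i + L) (l - 1))
        else Gfun arr i (min (i + (L - 1)) (l - 1)) := by
  intro k
  induction k with
  | zero =>
    intro dp hk hlen hdp
    simp only [List.range_zero, List.foldl_nil]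
    exact ⟨hlen, fun i hi => by rw [if_neg (by omega)]; exact hdp i hi⟩
  | succ k ih =>
    intro dp hk hlen hdp
    obtain ⟨ihlen, ihval⟩ := ih dp (by omega) hlen hdp
    rw [List.range_succ, List.foldl_append, List.foldl_cons, List.foldl_nil]
    have hkl : k + L < l := by omega
    have e1 : ((List.range k).foldl
        (fun (dp : List Int) i => dp.set i (max (arr.getD i 0 - dp.getD (i + 1) 0)
          (arr.getD (i + L) 0 - dp.getD i 0))) dp).getD (k + 1) 0 =
        Gfun arr (k + 1) (k + L) := by
      rw [ihval (k + 1) (by omega), if_neg (by omega),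
        show min (k + 1 + (L - 1)) (l - 1) = k + L from by omega]
    have e2 : ((List.range k).foldl
        (fun (dp : List Int) i => dp.set i (max (arr.getD i 0 - dp.getD (i + 1) 0)
          (arr.getD (i + L) 0 - dp.getD i 0))) dp).getD k 0 =
        Gfun arr k (k + L - 1) := by
      rw [ihval k (by omega), if_neg (by omega),
        show min (k + (L - 1)) (l - 1) = k + L - 1 from by omega]
    refine ⟨by simpa using ihlen, fun i hi => ?_⟩
    rw [pvGetDSet _ k _ i (by omega)]
    by_cases hik : i = k
    · subst hik
      rw [if_pos (show i < i + 1 from by omega), e1, e2,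
        show min (i + L) (l - 1) = i + L from by omega,
        Gfun_lt arr i (i + L) (by omega), if_pos rfl]
    · rw [if_neg hik]
      by_cases hik1 : i < k + 1
      · rw [if_pos hik1, ihval i hi, if_pos (by omega)]
      · rw [if_neg hik1, ihval i hi, if_neg (by omega)]

theorem lenLoop_inv (arr : List Int) (l : Nat) :
    ∀ d L dp, l ≤ L + d → 1 ≤ L → dp.length = l →
      (∀ i, i < l → dp.getD i 0 = Gfun arr i (min (i + (L - 1)) (l - 1))) →
      ∀ i, i < l → (lenLoop arr l L dp).getD i 0 = Gfun arr i (l - 1) := by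
  intro d
  induction d with
  | zero =>
    intro L dp hd hL hlen hdp i hi
    rw [lenLoop, dif_neg (show ¬ L < l by omega)]
    rw [hdp i hi, show min (i + (L - 1)) (l - 1) = l - 1 from by omega]
  | succ d ih =>
    intro L dp hd hL hlen hdp i hi
    by_cases hLl : L < l
    · rw [lenLoop, dif_pos hLl]
      obtain ⟨hlen', hval'⟩ := rowFold_inv arr l L hL hLl (l - L) dp le_rfl hlen hdp
      refine ih (L + 1) _ (by omega) (by omega) ?_ ?_ i hi
      · show (rowLoop arr l L dp).length = l
        exact hlen'
      · intro i hi
        show (rowLoop arr l L dp).getD i 0 = _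
        rw [show (rowLoop arr l L dp) = _ from rfl]
        unfold rowLoop
        rw [hval' i hi, show L + 1 - 1 = L from by omega]
        by_cases h : i < l - L
        · rw [if_pos h]
        · rw [if_neg h, show min (i + (L - 1)) (l - 1) = l - 1 from by omega,
            show min (i + L) (l - 1) = l - 1 from by omega]
    · rw [lenLoop, dif_neg hLl]
      rw [hdp i hi, show min (i + (L - 1)) (l - 1) = l - 1 from by omega]

-- ===== VERDICT (by name: the statement is the Claim_ definition above) =====
theorem numberGet2_spec : Claim_equal_numberGet2 := by
  intro arr _hdom hpre
  unfold Pre_numberGet2 at hpre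
  have hl : 0 < arr.length := List.length_pos_of_ne_nil hpre
  unfold Spec_numberGet2 numberGet2 numberGet2_alt
  have hinit : ∀ a b, a ≤ b → b < arr.length → b - a < 1 →
      (initLoop arr arr.length 0 (fun _ _ => -1) (fun _ _ => -1)).1 a b = Ffun arr a b ∧
      (initLoop arr arr.length 0 (fun _ _ => -1) (fun _ _ => -1)).2 a b = Sfun arr a b := by
    intro a b hab hbl hba
    have hab' : a = b := by omega
    subst hab'
    obtain ⟨h1, h2⟩ := initLoop_inv arr arr.length arr.length 0
      (fun _ _ => -1) (fun _ _ => -1) (by omega) a a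
    rw [h1, h2, if_pos ⟨rfl, by omega, hbl⟩, if_pos ⟨rfl, by omega, hbl⟩,
      Ffun_ge arr a a (by omega), Sfun_ge arr a a (by omega)]
    exact ⟨rfl, rfl⟩
  obtain ⟨hA1, hA2⟩ := diagLoop_inv arr arr.length arr.length 1
    (initLoop arr arr.length 0 (fun _ _ => -1) (fun _ _ => -1)) (by omega) le_rfl
    hinit 0 (arr.length - 1) (by omega) (by omega)
  have hB := lenLoop_inv arr arr.length arr.length 1 arr (by omega) le_rfl rfl
    (fun i hi => by
      rw [show min (i + (1 - 1)) (arr.length - 1) = i from by omega,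
        Gfun_ge arr i i (by omega)]) 0 hl
  have hFS := (FS_G arr (arr.length - 1) 0 (arr.length - 1) (by omega)).2
  simp only [hA1, hA2, hB]
  split_ifs <;> first | rfl | omega
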